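-- pv_equiv track=rewrite | github.com/rldnd/algorithm | boj/python/silver/9375/main.py | get_combination_multiple
-- ===== SOURCE A (Python) =====
-- from itertools import combinations
--
-- def get_combination_multiple(arr, length):
--     count = 0
--     combs = list(map(list, combinations(arr, length)))
--     for lst in combs:
--         mul = 1
--         for item in lst:
--             mul *= item
--         count += mul
--     return count
-- ===== SOURCE B (Python) =====
-- def get_combination_multiple(arr, length):
--     # DP for the elementary symmetric polynomial e_length(arr):
--     # e[j] after processing a prefix = sum of products of all j-subsets of that prefix.
--     if length > len(arr):
--         return 0
--     e = [1] + [0] * length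
--     for x in arr:
--         e = [e[0]] + [e[j] + e[j - 1] * x for j in range(1, len(e))]
--     return e[length]
-- ===== Notes on version B (the rewrite author's own statement) =====
-- stated objective: faster
-- what changed: Replaces enumerating all C(n,k) combinations and multiplying each with a one-pass dynamic program for the elementary symmetric polynomial e_k, updating a (k+1)-vector per element.
import Mathlib
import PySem

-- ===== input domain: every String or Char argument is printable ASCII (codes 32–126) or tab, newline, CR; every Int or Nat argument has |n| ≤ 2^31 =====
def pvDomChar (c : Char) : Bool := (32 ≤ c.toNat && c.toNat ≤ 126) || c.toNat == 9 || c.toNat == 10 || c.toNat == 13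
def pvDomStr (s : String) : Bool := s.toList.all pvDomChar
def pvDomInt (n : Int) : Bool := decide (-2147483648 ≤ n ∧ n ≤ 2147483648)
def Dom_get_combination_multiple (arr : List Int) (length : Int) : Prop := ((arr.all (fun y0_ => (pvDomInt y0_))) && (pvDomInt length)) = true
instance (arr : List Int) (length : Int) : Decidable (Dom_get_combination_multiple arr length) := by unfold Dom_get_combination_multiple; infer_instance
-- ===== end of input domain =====

-- B replaces enumeration of all C(n,k) combinations by a one-pass DP for the
-- elementary symmetric polynomial e_k (objective: faster, asymptotic).


-- ===== PORT A =====
-- itertools.combinations(arr, r) in index order, each combination as a list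
def pyCombinations (r : Nat) (xs : List Int) : List (List Int) :=
  match r, xs with
  | 0, _ => [[]]
  | _ + 1, [] => []
  | r + 1, x :: xs => (pyCombinations r xs).map (fun c => x :: c) ++ pyCombinations (r + 1) xs

def get_combination_multiple (arr : List Int) (length : Int) : Int :=
  -- Python raises ValueError for a negative r; those inputs are outside Pre_
  if length < 0 then 0
  else
    (pyCombinations length.toNat arr).foldl
      (fun count lst => count + lst.foldl (fun mul item => mul * item) 1) 0

-- ===== PORT B =====
-- one DP step: e' = [e[0]] ++ [e[j] + e[j-1]*x for j in 1..len(e)-1]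
def stepE (x : Int) (e : List Int) : List Int :=
  match e with
  | [] => []
  | h :: t => h :: List.zipWith (fun prev cur => cur + prev * x) (h :: t) t

def get_combination_multiple_alt (arr : List Int) (length : Int) : Int :=
  if length > (arr.length : Int) then 0
  else
    -- e[length]; inside Pre_ the index is valid
    (PySem.List.pyGet?
      (arr.foldl (fun e x => stepE x e) (1 :: List.replicate length.toNat 0)) length).getD 0

-- ===== PRECONDITION & SPEC =====
-- Pre_ excludes length < 0, where Python A raises ValueError (combinations with negative r).
def Pre_get_combination_multiple (_arr : List Int) (length : Int) : Prop := 0 ≤ length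
instance (arr : List Int) (length : Int) : Decidable (Pre_get_combination_multiple arr length) := by unfold Pre_get_combination_multiple; infer_instance
def pvWitness_get_combination_multiple : List Int × Int := ([1, 2, 3], 2)

def Spec_get_combination_multiple (arr : List Int) (length : Int) (out : Int) : Prop := out = get_combination_multiple_alt arr length
instance (arr : List Int) (length : Int) (out : Int) : Decidable (Spec_get_combination_multiple arr length out) := by unfold Spec_get_combination_multiple; infer_instance

-- ===== CLAIM (what is proved, stated in full; the proofs are below) =====
def Claim_equal_get_combination_multiple : Prop := ∀ (arr : List Int) (length : Int), Dom_get_combination_multiple arr length → Pre_get_combination_multiple arr length → Spec_get_combination_multiple arr length (get_combination_multiple arr length)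

-- ===== LEMMAS AND PROOFS =====

-- elementary symmetric polynomial
def esym : Nat → List Int → Int
  | 0, _ => 1
  | _ + 1, [] => 0
  | j + 1, x :: xs => x * esym j xs + esym (j + 1) xs

def prodF (l : List Int) : Int := l.foldl (fun mul item => mul * item) 1

lemma foldl_mul_init (l : List Int) : ∀ a : Int, l.foldl (fun m i => m * i) a = a * l.foldl (fun m i => m * i) 1 := by
  induction l with
  | nil => intro a; simp
  | cons x xs ih =>
    intro a
    simp only [List.foldl_cons]
    rw [ih (a * x), ih (1 * x)]
    ring

lemma prodF_cons (x : Int) (l : List Int) : prodF (x :: l) = x * prodF l := by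
  simp only [prodF, List.foldl_cons]
  rw [foldl_mul_init l (1 * x)]
  ring

lemma sum_prod_combs (xs : List Int) : ∀ k, ((pyCombinations k xs).map prodF).sum = esym k xs := by
  induction xs with
  | nil =>
    intro k
    cases k <;> simp [pyCombinations, esym, prodF]
  | cons x xs ih =>
    intro k
    cases k with
    | zero => simp [pyCombinations, esym, prodF]
    | succ k =>
      simp only [pyCombinations, esym, List.map_append, List.sum_append, List.map_map]
      rw [← ih k, ← ih (k + 1)]
      congr 1
      have : (prodF ∘ fun c => x :: c) = fun c => x * prodF c := by
        funext c; simp [prodF_cons]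
      rw [this]
      simp [List.sum_map_mul_left]

lemma foldl_add_prod (L : List (List Int)) : ∀ c : Int,
    L.foldl (fun count lst => count + lst.foldl (fun mul item => mul * item) 1) c
      = c + (L.map prodF).sum := by
  induction L with
  | nil => intro c; simp
  | cons l L ih =>
    intro c
    simp only [List.foldl_cons, List.map_cons, List.sum_cons]
    rw [ih]
    show c + prodF l + _ = _
    ring

lemma esym_zero_any (l : List Int) : esym 0 l = 1 := by cases l <;> rfl

-- esym recursion on appending an element at the END
lemma esym_append (x : Int) (p : List Int) : ∀ j, esym (j + 1) (p ++ [x]) = esym (j + 1) p + x * esym j p := by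
  induction p with
  | nil => intro j; cases j <;> simp [esym]
  | cons y p ih =>
    intro j
    cases j with
    | zero =>
      simp only [List.cons_append, esym, ih 0, esym_zero_any]
      ring
    | succ j =>
      simp only [List.cons_append, esym, ih j, ih (j + 1)]
      ring

-- stepE on a range-map vector
lemma stepE_map_range (x : Int) (k : Nat) (g : Nat → Int) :
    stepE x ((List.range (k + 1)).map g)
      = (List.range (k + 1)).map (fun j => match j with | 0 => g 0 | j + 1 => g (j + 1) + g j * x) := by
  have hmr : (List.range (k + 1)).map g = g 0 :: (List.range k).map (fun j => g (j + 1)) := by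
    rw [List.range_succ_eq_map, List.map_cons, List.map_map]
    rfl
  have hlen : ∀ (e : List Int), (stepE x e).length = e.length := by
    intro e; cases e with
    | nil => rfl
    | cons h t => simp [stepE]
  apply List.ext_getElem?
  intro i
  rcases Nat.lt_or_ge i (k + 1) with hi | hi
  · have hmr2 : (List.range (k + 1)).map
        (fun j => match j with | 0 => g 0 | j + 1 => g (j + 1) + g j * x)
        = g 0 :: (List.range k).map (fun j => g (j + 1) + g j * x) := by
      rw [List.range_succ_eq_map, List.map_cons, List.map_map]
      rfl
    rw [hmr, hmr2]
    cases i with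
    | zero => simp [stepE]
    | succ i =>
      simp only [stepE]
      rw [List.getElem?_cons_succ, List.getElem?_cons_succ, List.getElem?_zipWith]
      have hik : i < k := by omega
      have h4 : ((List.range k).map (fun j => g (j + 1) + g j * x))[i]? = some (g (i + 1) + g i * x) := by
        rw [List.getElem?_map]
        simp [hik]
      have h1 : (g 0 :: (List.range k).map (fun j => g (j + 1)))[i]? = some (g i) := by
        cases i with
        | zero => simp
        | succ i =>
          rw [List.getElem?_cons_succ, List.getElem?_map]
          have : i < k := by omega
          simp [this]
      have h2 : ((List.range k).map (fun j => g (j + 1)))[i]? = some (g (i + 1)) := by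
        rw [List.getElem?_map]
        simp [hik]
      rw [h1, h2, h4]
  · have h1 : (stepE x ((List.range (k + 1)).map g))[i]? = none := by
      rw [List.getElem?_eq_none]
      rw [hlen]; simpa using hi
    have h2 : ((List.range (k + 1)).map
        (fun j => match j with | 0 => g 0 | j + 1 => g (j + 1) + g j * x))[i]? = none := by
      rw [List.getElem?_eq_none]; simpa using hi
    rw [h1, h2]

def evec (k : Nat) (p : List Int) : List Int := (List.range (k + 1)).map (fun j => esym j p)

lemma evec_nil (k : Nat) : evec k [] = 1 :: List.replicate k 0 := by
  apply List.ext_getElem?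
  intro i
  simp only [evec]
  rcases Nat.lt_or_ge i (k + 1) with hi | hi
  · rw [List.getElem?_map]
    simp only [List.getElem?_range, hi]
    cases i with
    | zero => simp [esym]
    | succ i =>
      have : i < k := by omega
      simp [esym, this]
  · rw [List.getElem?_eq_none (by simpa using hi), List.getElem?_eq_none (by simp; omega)]

lemma stepE_evec (x : Int) (k : Nat) (p : List Int) : stepE x (evec k p) = evec k (p ++ [x]) := by
  unfold evec
  rw [stepE_map_range]
  apply List.map_congr_left
  intro j _
  cases j with
  | zero => simp [esym_zero_any]
  | succ j =>
    simp only [esym_append]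
    ring

lemma foldl_stepE (l : List Int) : ∀ p : List Int, ∀ k,
    l.foldl (fun e x => stepE x e) (evec k p) = evec k (p ++ l) := by
  induction l with
  | nil => intro p k; simp
  | cons x xs ih =>
    intro p k
    simp only [List.foldl_cons]
    rw [stepE_evec, ih (p ++ [x]) k]
    simp

lemma esym_gt_length (l : List Int) : ∀ k, l.length < k → esym k l = 0 := by
  induction l with
  | nil => intro k hk; cases k with | zero => omega | succ k => rfl
  | cons x xs ih =>
    intro k hk
    cases k with
    | zero => omega
    | succ k =>
      simp only [List.length_cons] at hk
      simp [esym, ih k (by omega), ih (k + 1) (by omega)]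

-- ===== VERDICT (by name: the statement is the Claim_ definition above) =====
theorem get_combination_multiple_spec : Claim_equal_get_combination_multiple := by
  intro arr length _ hpre
  unfold Spec_get_combination_multiple get_combination_multiple get_combination_multiple_alt
  have hneg : ¬ length < 0 := by exact not_lt.mpr hpre
  rw [if_neg hneg]
  rw [foldl_add_prod, sum_prod_combs]
  have hfold : arr.foldl (fun e x => stepE x e) (1 :: List.replicate length.toNat 0) = evec length.toNat arr := by
    rw [← evec_nil, foldl_stepE]
    simp
  rw [hfold]
  by_cases hgt : length > (arr.length : Int)
  · rw [if_pos hgt, esym_gt_length arr length.toNat (by omega)]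
    ring
  · rw [if_neg hgt]
    have hget : PySem.List.pyGet? (evec length.toNat arr) length = some (esym length.toNat arr) := by
      rw [PySem.List.pyGet?_of_nonneg _ hpre]
      unfold evec
      rw [List.getElem?_map]
      simp
    rw [hget]
    simp
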